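-- pv_equiv track=rewrite | github.com/stackviolator/HoundBench | scripts/prepare_dataset_for_hub.py | validate_query_syntax
-- ===== SOURCE A (Python) =====
-- from typing import Dict, List, Any, Tuple
--
-- def validate_query_syntax(query: str) -> Tuple[bool, List[str]]:
--     """Basic Cypher syntax validation."""
--     errors = []
--
--     # Check for basic Cypher keywords
--     cypher_keywords = ['MATCH', 'WHERE', 'RETURN', 'WITH', 'OPTIONAL', 'CREATE', 'DELETE', 'SET']
--     has_cypher_keyword = any(keyword.upper() in query.upper() for keyword in cypher_keywords)
--
--     if not has_cypher_keyword:
--         errors.append("No Cypher keywords found")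
--
--     # Check for balanced parentheses
--     paren_count = query.count('(') - query.count(')')
--     if paren_count != 0:
--         errors.append(f"Unbalanced parentheses (difference: {paren_count})")
--
--     # Check for balanced brackets
--     bracket_count = query.count('[') - query.count(']')
--     if bracket_count != 0:
--         errors.append(f"Unbalanced brackets (difference: {bracket_count})")
--
--     # Check for balanced braces
--     brace_count = query.count('{') - query.count('}')
--     if brace_count != 0:
--         errors.append(f"Unbalanced braces (difference: {brace_count})")
--
--     return len(errors) == 0, errors
-- ===== SOURCE B (Python) =====
-- def validate_query_syntax(query):
--     """Basic Cypher syntax validation (single-pass delimiter counting)."""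
--     up = query.upper()
--     errors = []
--     if not any(k in up for k in ('MATCH', 'WHERE', 'RETURN', 'WITH',
--                                  'OPTIONAL', 'CREATE', 'DELETE', 'SET')):
--         errors.append("No Cypher keywords found")
--     p = b = c = 0
--     for ch in query:
--         if ch == '(':
--             p += 1
--         elif ch == ')':
--             p -= 1
--         elif ch == '[':
--             b += 1
--         elif ch == ']':
--             b -= 1
--         elif ch == '{':
--             c += 1
--         elif ch == '}':
--             c -= 1
--     for n, name in ((p, "parentheses"), (b, "brackets"), (c, "braces")):
--         if n != 0:
--             errors.append(f"Unbalanced {name} (difference: {n})")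
--     return len(errors) == 0, errors
-- ===== Notes on version B (the rewrite author's own statement) =====
-- stated objective: alternative
-- what changed: Replaces the six separate .count() scans of the query with one single pass over its characters maintaining three open-minus-close counters, and emits the three delimiter messages from a small data table instead of three copied code blocks.
import Mathlib
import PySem

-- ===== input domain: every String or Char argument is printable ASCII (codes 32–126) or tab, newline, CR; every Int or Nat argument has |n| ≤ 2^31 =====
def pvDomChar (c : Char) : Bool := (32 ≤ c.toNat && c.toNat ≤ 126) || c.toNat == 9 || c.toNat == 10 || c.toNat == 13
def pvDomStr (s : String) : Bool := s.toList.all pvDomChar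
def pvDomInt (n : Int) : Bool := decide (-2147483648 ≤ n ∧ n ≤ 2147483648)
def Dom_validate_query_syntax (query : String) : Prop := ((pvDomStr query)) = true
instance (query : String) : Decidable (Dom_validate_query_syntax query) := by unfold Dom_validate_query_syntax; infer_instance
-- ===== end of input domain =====

-- B folds the six separate .count() scans into one single pass over the characters
-- (three open-minus-close counters) and emits the three delimiter messages from a table.


-- ===== PORT A =====
def validate_query_syntax (query : String) : Bool × List String :=
  let errors : List String := []
  let cypher_keywords : List String := ["MATCH", "WHERE", "RETURN", "WITH", "OPTIONAL", "CREATE", "DELETE", "SET"]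
  let has_cypher_keyword := cypher_keywords.any (fun keyword => PySem.Str.isIn (PySem.Str.upper keyword) (PySem.Str.upper query))
  let errors := if !has_cypher_keyword then errors ++ ["No Cypher keywords found"] else errors
  let paren_count : Int := (PySem.Str.count query "(" : Int) - (PySem.Str.count query ")" : Int)
  let errors := if paren_count ≠ 0 then errors ++ ["Unbalanced parentheses (difference: " ++ PySem.Int.toStr paren_count ++ ")"] else errors
  let bracket_count : Int := (PySem.Str.count query "[" : Int) - (PySem.Str.count query "]" : Int)
  let errors := if bracket_count ≠ 0 then errors ++ ["Unbalanced brackets (difference: " ++ PySem.Int.toStr bracket_count ++ ")"] else errors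
  let brace_count : Int := (PySem.Str.count query "{" : Int) - (PySem.Str.count query "}" : Int)
  let errors := if brace_count ≠ 0 then errors ++ ["Unbalanced braces (difference: " ++ PySem.Int.toStr brace_count ++ ")"] else errors
  (decide (errors.length = 0), errors)

-- ===== PORT B =====
def vqsAltStep (acc : Int × Int × Int) (ch : Char) : Int × Int × Int :=
  if ch = '(' then (acc.1 + 1, acc.2.1, acc.2.2)
  else if ch = ')' then (acc.1 - 1, acc.2.1, acc.2.2)
  else if ch = '[' then (acc.1, acc.2.1 + 1, acc.2.2)
  else if ch = ']' then (acc.1, acc.2.1 - 1, acc.2.2)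
  else if ch = '{' then (acc.1, acc.2.1, acc.2.2 + 1)
  else if ch = '}' then (acc.1, acc.2.1, acc.2.2 - 1)
  else acc

def validate_query_syntax_alt (query : String) : Bool × List String :=
  let up := PySem.Str.upper query
  let keywords : List String := ["MATCH", "WHERE", "RETURN", "WITH", "OPTIONAL", "CREATE", "DELETE", "SET"]
  let errors : List String := if !(keywords.any fun k => PySem.Str.isIn k up) then ["No Cypher keywords found"] else []
  let counts := query.toList.foldl vqsAltStep (0, 0, 0)
  let errors := [(counts.1, "parentheses"), (counts.2.1, "brackets"), (counts.2.2, "braces")].foldl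
    (fun errs pr => if pr.1 ≠ 0 then errs ++ ["Unbalanced " ++ pr.2 ++ " (difference: " ++ PySem.Int.toStr pr.1 ++ ")"] else errs) errors
  (decide (errors.length = 0), errors)

-- ===== PRECONDITION & SPEC =====
def Spec_validate_query_syntax (query : String) (out : Bool × List String) : Prop := out = validate_query_syntax_alt query
instance (query : String) (out : Bool × List String) : Decidable (Spec_validate_query_syntax query out) := by unfold Spec_validate_query_syntax; infer_instance

-- ===== CLAIM (what is proved, stated in full; the proofs are below) =====
def Claim_equal_validate_query_syntax : Prop := ∀ (query : String), Dom_validate_query_syntax query → Spec_validate_query_syntax query (validate_query_syntax query)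

-- ===== LEMMAS AND PROOFS =====

-- Chars.count with a single-character pattern is List.count
theorem vqs_count_go_single (c : Char) : ∀ (cs : List Char) (fuel acc : Nat), cs.length ≤ fuel →
    PySem.Chars.count.go [c] fuel cs acc = acc + cs.count c := by
  intro cs
  induction cs with
  | nil => intro fuel acc _; cases fuel <;> simp [PySem.Chars.count.go]
  | cons h t ih =>
    intro fuel acc hle
    cases fuel with
    | zero => simp at hle
    | succ f =>
      by_cases hc : h = c
      · subst hc
        simp [PySem.Chars.count.go, List.isPrefixOf,
              ih f (acc+1) (by simpa using hle)]
        omega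
      · have hc' : ¬ c = h := fun e => hc e.symm
        simp [PySem.Chars.count.go, List.isPrefixOf, hc, hc',
              ih f acc (by simpa using hle)]

theorem vqs_count_single (s : List Char) (c : Char) :
    PySem.Chars.count s [c] = s.count c := by
  simp [PySem.Chars.count, vqs_count_go_single c s s.length 0 (le_refl _)]

-- the single-pass fold computes the three open-minus-close differences
theorem vqs_fold_counts : ∀ (cs : List Char) (p b c : Int),
    cs.foldl vqsAltStep (p, b, c) =
      (p + (cs.count '(' : Int) - (cs.count ')' : Int),
       b + (cs.count '[' : Int) - (cs.count ']' : Int),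
       c + (cs.count '{' : Int) - (cs.count '}' : Int)) := by
  intro cs
  induction cs with
  | nil => intro p b c; simp
  | cons h t ih =>
    intro p b c
    simp only [List.foldl_cons, vqsAltStep]
    split_ifs <;> simp_all <;> ring

-- ===== VERDICT (by name: the statement is the Claim_ definition above) =====
theorem validate_query_syntax_spec : Claim_equal_validate_query_syntax := by
  intro query _
  unfold Spec_validate_query_syntax validate_query_syntax validate_query_syntax_alt
  have hk : (["MATCH", "WHERE", "RETURN", "WITH", "OPTIONAL", "CREATE", "DELETE", "SET"] : List String).any
      (fun keyword => PySem.Str.isIn (PySem.Str.upper keyword) (PySem.Str.upper query)) =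
      (["MATCH", "WHERE", "RETURN", "WITH", "OPTIONAL", "CREATE", "DELETE", "SET"] : List String).any
      (fun k => PySem.Str.isIn k (PySem.Str.upper query)) := by
    simp only [List.any_cons, List.any_nil]
    rfl
  have c1 : PySem.Str.count query "(" = query.toList.count '(' := by
    rw [PySem.Str.count_eq]; exact vqs_count_single _ _
  have c2 : PySem.Str.count query ")" = query.toList.count ')' := by
    rw [PySem.Str.count_eq]; exact vqs_count_single _ _
  have c3 : PySem.Str.count query "[" = query.toList.count '[' := by
    rw [PySem.Str.count_eq]; exact vqs_count_single _ _
  have c4 : PySem.Str.count query "]" = query.toList.count ']' := by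
    rw [PySem.Str.count_eq]; exact vqs_count_single _ _
  have c5 : PySem.Str.count query "{" = query.toList.count '{' := by
    rw [PySem.Str.count_eq]; exact vqs_count_single _ _
  have c6 : PySem.Str.count query "}" = query.toList.count '}' := by
    rw [PySem.Str.count_eq]; exact vqs_count_single _ _
  simp only [hk, c1, c2, c3, c4, c5, c6, vqs_fold_counts query.toList 0 0 0,
    List.foldl_cons, List.foldl_nil, zero_add]
  split_ifs <;> rfl
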